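-- pv_equiv track=rewrite | github.com/RosettaCommons/rhiju_python | util_for_rna_homology.py | make_tag_with_dashes
-- ===== SOURCE A (Python) =====
-- def make_tag_with_dashes( int_vector ):
--     tag = ''
--
--     start_res = int_vector[0]
--     for i in range( 1, len(int_vector)+1 ):
--         if i==len( int_vector)  or  int_vector[i] != int_vector[i-1]+1:
--
--             stop_res = int_vector[i-1]
--             if stop_res > start_res:
--                 tag += ' %d-%d' % (start_res, stop_res )
--             else:
--                 tag += ' %d' % (stop_res )
--
--             if ( i < len( int_vector) ): start_res = int_vector[i]
--
--     return tag
-- ===== SOURCE B (Python) =====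
-- def make_tag_with_dashes(int_vector):
--     # staged passes: compute run starts and run stops by zipping the vector
--     # with its own shift, then pair them up and format
--     starts = [int_vector[0]] + [v for p, v in zip(int_vector, int_vector[1:]) if v != p + 1]
--     stops = [v for v, nxt in zip(int_vector, int_vector[1:]) if nxt != v + 1] + [int_vector[-1]]
--     return ''.join(' %d-%d' % (a, b) if b > a else ' %d' % b for a, b in zip(starts, stops))
-- ===== Notes on version B (the rewrite author's own statement) =====
-- stated objective: idiomatic
-- what changed: B replaces A's stateful boundary-detection index loop by staged passes: it zips the vector with its own shift to extract the list of run starts and the list of run stops as two comprehensions, then zips those and formats each pair.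
import Mathlib
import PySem

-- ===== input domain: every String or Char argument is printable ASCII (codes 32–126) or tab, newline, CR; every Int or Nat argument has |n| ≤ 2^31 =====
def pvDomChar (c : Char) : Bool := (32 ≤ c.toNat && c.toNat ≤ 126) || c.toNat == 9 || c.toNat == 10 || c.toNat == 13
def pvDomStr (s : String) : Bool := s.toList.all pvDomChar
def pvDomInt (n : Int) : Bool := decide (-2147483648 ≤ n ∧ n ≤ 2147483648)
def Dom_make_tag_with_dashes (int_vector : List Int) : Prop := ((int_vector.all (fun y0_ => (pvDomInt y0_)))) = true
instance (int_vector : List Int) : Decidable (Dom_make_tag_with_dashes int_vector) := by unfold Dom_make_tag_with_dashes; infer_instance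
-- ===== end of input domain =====

-- B replaces A's stateful boundary-detection loop by staged passes (zip the vector with its shift to get run starts and run stops, then zip and format); equal on every nonempty input; both raise IndexError on the empty list.


-- ===== PORT A =====
-- literal transliteration of A; out-of-range indexing is represented with `.getD 0`,
-- never reached on Pre_ (nonempty list keeps every access in range)
def make_tag_with_dashes (int_vector : List Int) : String :=
  let n : Int := (int_vector.length : Int)
  let start0 : Int := (PySem.List.pyGet? int_vector 0).getD 0
  let r := (PySem.List.pyRange 1 (n + 1) 1).foldl
    (fun (st : String × Int) (i : Int) =>
      if i = n ∨ (PySem.List.pyGet? int_vector i).getD 0 ≠ (PySem.List.pyGet? int_vector (i - 1)).getD 0 + 1 then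
        let stop_res : Int := (PySem.List.pyGet? int_vector (i - 1)).getD 0
        let tag : String :=
          if stop_res > st.2 then
            st.1 ++ (" " ++ PySem.Int.toStr st.2 ++ "-" ++ PySem.Int.toStr stop_res)
          else
            st.1 ++ (" " ++ PySem.Int.toStr stop_res)
        let start_res : Int := if i < n then (PySem.List.pyGet? int_vector i).getD 0 else st.2
        (tag, start_res)
      else st)
    ("", start0)
  r.1

-- ===== PORT B =====
-- B-side helper: the per-run formatter (Source B's conditional expression in the join)
def mtdFmt (p : Int × Int) : String :=
  if p.2 > p.1 then " " ++ PySem.Int.toStr p.1 ++ "-" ++ PySem.Int.toStr p.2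
  else " " ++ PySem.Int.toStr p.2

-- Source B: starts/stops comprehensions over zip(int_vector, int_vector[1:]), then zip and join
def make_tag_with_dashes_alt (int_vector : List Int) : String :=
  let shifted := PySem.List.slice int_vector (some 1) none
  let starts : List Int :=
    [(PySem.List.pyGet? int_vector 0).getD 0] ++
      ((int_vector.zip shifted).filterMap
        (fun pv => if pv.2 ≠ pv.1 + 1 then some pv.2 else none))
  let stops : List Int :=
    ((int_vector.zip shifted).filterMap
        (fun pv => if pv.2 ≠ pv.1 + 1 then some pv.1 else none)) ++
      [(PySem.List.pyGet? int_vector (-1)).getD 0]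
  PySem.Str.join "" ((starts.zip stops).map mtdFmt)

-- ===== PRECONDITION & SPEC =====
-- Pre_ excludes only the empty list, where A raises IndexError reading the first element (B raises there too)
def Pre_make_tag_with_dashes (int_vector : List Int) : Prop := int_vector ≠ []
instance (int_vector : List Int) : Decidable (Pre_make_tag_with_dashes int_vector) := by unfold Pre_make_tag_with_dashes; infer_instance
def pvWitness_make_tag_with_dashes : List Int := [1, 2, 3, 7, 9, 10]

def Spec_make_tag_with_dashes (int_vector : List Int) (out : String) : Prop := out = make_tag_with_dashes_alt int_vector
instance (int_vector : List Int) (out : String) : Decidable (Spec_make_tag_with_dashes int_vector out) := by unfold Spec_make_tag_with_dashes; infer_instance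

-- ===== CLAIM (what is proved, stated in full; the proofs are below) =====
def Claim_equal_make_tag_with_dashes : Prop := ∀ (int_vector : List Int), Dom_make_tag_with_dashes int_vector → Pre_make_tag_with_dashes int_vector → Spec_make_tag_with_dashes int_vector (make_tag_with_dashes int_vector)

-- ===== LEMMAS AND PROOFS =====

-- canonical run decomposition: mtdGo a b l = the maximal consecutive runs of a run-in-progress (a..b) followed by l
def mtdGo (a b : Int) : List Int → List (Int × Int)
  | [] => [(a, b)]
  | v :: l => if v = b + 1 then mtdGo a v l else (a, b) :: mtdGo v v l

-- B's zip of the starts and stops comprehensions is exactly the run decomposition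
theorem zip_starts_stops (l : List Int) : ∀ (a b : Int),
    ((a :: (((b :: l).zip l).filterMap
        (fun pv => if pv.2 ≠ pv.1 + 1 then some pv.2 else none))).zip
      ((((b :: l).zip l).filterMap
        (fun pv => if pv.2 ≠ pv.1 + 1 then some pv.1 else none)) ++
        [(b :: l).getLast?.getD 0])) = mtdGo a b l := by
  induction l with
  | nil => intro a b; simp [mtdGo]
  | cons v l ih =>
    intro a b
    simp only [List.zip_cons_cons, List.filterMap_cons, mtdGo]
    by_cases h : v = b + 1
    · simp only [h, ne_eq, not_true_eq_false, if_pos, ite_not]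
      have := ih a v
      simpa [h] using this
    · simp only [ne_eq, h, not_false_iff, if_pos]
      have := ih v v
      simp only [List.cons_append, List.zip_cons_cons]
      rw [show (b :: v :: l).getLast?.getD 0 = (v :: l).getLast?.getD 0 by
        simp [List.getLast?_cons_cons]]
      rw [this]
      simp

theorem join_nil_eq_flatten (cs : List (List Char)) : PySem.Chars.join [] cs = cs.flatten := by
  simp [PySem.Chars.join, List.intercalate]
  induction cs with
  | nil => simp
  | cons c cs ih => cases cs <;> simp_all [List.intersperse]

theorem alt_toList (x : Int) (l : List Int) :
    (make_tag_with_dashes_alt (x :: l)).toList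
      = ((mtdGo x x l).map (fun p => (mtdFmt p).toList)).flatten := by
  rw [make_tag_with_dashes_alt]
  simp only [PySem.List.slice_from_one, List.tail_cons,
    PySem.List.pyGet?_zero_cons, Option.getD_some, PySem.List.pyGet?_neg_one,
    List.singleton_append]
  rw [zip_starts_stops l x x, PySem.Str.toList_join,
    show "".toList = ([] : List Char) from rfl, join_nil_eq_flatten]
  simp [Function.comp_def]

-- A's loop over the remaining indices k..n computes the tag of the runs of start, xs[k-1], drop k xs
theorem makeA_loop (xs : List Int) (m : Nat) :
    ∀ (k : Nat) (tag : String) (start : Int), 1 ≤ k → k + m = xs.length →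
    ((PySem.List.pyRange (k : Int) ((xs.length : Int) + 1) 1).foldl
      (fun (st : String × Int) (i : Int) =>
        if i = (xs.length : Int) ∨ (PySem.List.pyGet? xs i).getD 0 ≠ (PySem.List.pyGet? xs (i - 1)).getD 0 + 1 then
          ((if (PySem.List.pyGet? xs (i - 1)).getD 0 > st.2 then
              st.1 ++ (" " ++ PySem.Int.toStr st.2 ++ "-" ++ PySem.Int.toStr ((PySem.List.pyGet? xs (i - 1)).getD 0))
            else
              st.1 ++ (" " ++ PySem.Int.toStr ((PySem.List.pyGet? xs (i - 1)).getD 0))),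
           (if i < (xs.length : Int) then (PySem.List.pyGet? xs i).getD 0 else st.2))
        else st)
      (tag, start)).1.toList
      = tag.toList ++ ((mtdGo start (xs.getD (k - 1) 0) (xs.drop k)).map (fun p => (mtdFmt p).toList)).flatten := by
  have hpg : ∀ j : Nat, (PySem.List.pyGet? xs (j : Int)).getD 0 = xs.getD j 0 := by
    intro j; rw [PySem.List.pyGet?_natCast]; exact (List.getD_eq_getElem?_getD).symm
  induction m with
  | zero =>
    intro k tag start hk hkm
    have hkn : k = xs.length := by omega
    have hcast : ((k : Int) - 1) = ((k - 1 : Nat) : Int) := by omega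
    have hlt : (k : Int) < (xs.length : Int) + 1 := by omega
    rw [PySem.List.pyRange_one_cons hlt,
        PySem.List.pyRange_one_eq_nil (by omega : (xs.length : Int) + 1 ≤ (k : Int) + 1)]
    simp only [List.foldl_cons, List.foldl_nil]
    rw [if_pos (Or.inl (by exact_mod_cast congrArg Nat.cast hkn))]
    have hnlt : ¬ ((k : Int) < (xs.length : Int)) := by omega
    rw [if_neg hnlt]
    simp only [hcast, hpg]
    rw [show xs.drop k = [] by simp [hkn]]
    simp only [mtdGo, List.map_cons, List.map_nil, List.flatten_cons, List.flatten_nil,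
      List.append_nil, mtdFmt]
    split <;> simp
  | succ m ih =>
    intro k tag start hk hkm
    have hkn : k < xs.length := by omega
    have hlt : (k : Int) < (xs.length : Int) + 1 := by omega
    have hcast : ((k : Int) - 1) = ((k - 1 : Nat) : Int) := by omega
    have hsucc : ((k : Int) + 1) = ((k + 1 : Nat) : Int) := by push_cast; ring
    have hne : ¬ ((k : Int) = (xs.length : Int)) := by omega
    have hlt2 : (k : Int) < (xs.length : Int) := by omega
    have hdrop : xs.drop k = xs.getD k 0 :: xs.drop (k + 1) := by
      rw [List.drop_eq_getElem_cons hkn, List.getD_eq_getElem xs 0 hkn]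
    rw [PySem.List.pyRange_one_cons hlt]
    simp only [List.foldl_cons]
    by_cases hc : xs.getD k 0 = xs.getD (k - 1) 0 + 1
    · -- consecutive value: A's condition is false, B's run is extended
      rw [if_neg (by
        rw [hcast]
        simp only [hpg]
        push Not
        exact ⟨hne, hc⟩)]
      rw [hsucc, ih (k + 1) tag start (by omega) (by omega)]
      rw [hdrop]
      simp only [mtdGo, Nat.add_sub_cancel]
      rw [if_pos hc]
    · -- run boundary: A emits a chunk and restarts, B closes a run
      rw [if_pos (by
        rw [hcast]
        simp only [hpg]
        exact Or.inr hc)]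
      simp only [hcast, hpg]
      rw [if_pos hlt2]
      rw [hsucc, ih (k + 1) _ _ (by omega) (by omega)]
      rw [hdrop]
      simp only [mtdGo, Nat.add_sub_cancel]
      rw [if_neg hc]
      simp only [List.map_cons, List.flatten_cons, mtdFmt]
      split <;> simp

-- ===== VERDICT (by name: the statement is the Claim_ definition above) =====
theorem make_tag_with_dashes_spec : Claim_equal_make_tag_with_dashes := by
  intro v _ hpre
  unfold Spec_make_tag_with_dashes
  obtain ⟨x, l, rfl⟩ : ∃ x l, v = x :: l := by
    cases v with
    | nil => exact absurd rfl hpre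
    | cons x l => exact ⟨x, l, rfl⟩
  apply String.toList_inj.mp
  rw [alt_toList]
  show (make_tag_with_dashes (x :: l)).toList = _
  rw [make_tag_with_dashes]
  simp only []
  have h0 : (PySem.List.pyGet? (x :: l) 0).getD 0 = x := by
    simp [PySem.List.pyGet?, PySem.List.pyIdx?]
  rw [h0]
  have := makeA_loop (x :: l) l.length 1 "" x
    (le_refl 1) (by rw [List.length_cons]; omega)
  rw [show ((1 : Nat) : Int) = (1 : Int) by norm_cast] at this
  rw [this]
  simp
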